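-- pv_equiv track=rewrite | github.com/ktmed/medessencev2 | services/summary-generation/app/services/medical_terminology_service.py | _fuzzy_match_term
-- ===== SOURCE A (Python) =====
-- from typing import Dict, List, Optional, Tuple, Any
--
-- def _fuzzy_match_term(term: str, terms_dict: Dict) -> Optional[Dict]:
--     """Find fuzzy match for term in dictionary."""
--     term_lower = term.lower()
--
--     # Try exact match first
--     for dict_term, term_info in terms_dict.items():
--         if dict_term.lower() == term_lower:
--             return term_info
--
--     # Try partial match
--     for dict_term, term_info in terms_dict.items():
--         if term_lower in dict_term.lower() or dict_term.lower() in term_lower: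
--             return term_info
--
--     return None
-- ===== SOURCE B (Python) =====
-- def _fuzzy_match_term(term, terms_dict):
--     """Single pass: exact match returns immediately; first partial match is
--     remembered as a candidate and returned only if no exact match exists."""
--     term_lower = term.lower()
--     candidate = None
--     for dict_term, term_info in terms_dict.items():
--         dl = dict_term.lower()
--         if dl == term_lower:
--             return term_info
--         if candidate is None and (term_lower in dl or dl in term_lower):
--             candidate = term_info
--     return candidate
-- ===== Notes on version B (the rewrite author's own statement) =====
-- stated objective: simpler
-- what changed: Replaces A's two separate scans of the dict with one loop that returns on an exact match and remembers the first partial match as a candidate returned after the loop.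
import Mathlib
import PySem

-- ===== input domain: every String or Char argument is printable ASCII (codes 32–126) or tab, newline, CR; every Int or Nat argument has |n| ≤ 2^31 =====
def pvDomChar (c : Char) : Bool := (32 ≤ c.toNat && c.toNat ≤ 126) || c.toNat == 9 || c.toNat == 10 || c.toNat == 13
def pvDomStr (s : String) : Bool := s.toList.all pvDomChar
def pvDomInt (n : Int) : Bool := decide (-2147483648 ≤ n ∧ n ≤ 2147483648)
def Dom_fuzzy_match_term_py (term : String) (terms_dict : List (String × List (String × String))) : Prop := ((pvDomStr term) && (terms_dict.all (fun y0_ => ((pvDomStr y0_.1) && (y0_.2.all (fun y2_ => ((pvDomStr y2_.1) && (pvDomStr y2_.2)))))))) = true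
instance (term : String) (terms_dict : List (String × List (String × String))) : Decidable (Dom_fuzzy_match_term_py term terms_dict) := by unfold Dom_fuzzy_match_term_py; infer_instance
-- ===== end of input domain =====

-- B replaces A's two scans of the dict with one pass keeping a first-partial-match candidate (objective: simpler).

-- ===== PORT A =====
-- A: first loop = scan for an exact (case-insensitive) key match; second loop = scan for a partial match.
def fuzzy_match_term_py (term : String) (terms_dict : List (String × List (String × String))) : Option (List (String × String)) :=
  let term_lower := PySem.Str.lower term
  match terms_dict.find? (fun p => PySem.Str.lower p.1 == term_lower) with
  | some p => some p.2
  | none =>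
    match terms_dict.find? (fun p => PySem.Str.isIn term_lower (PySem.Str.lower p.1) || PySem.Str.isIn (PySem.Str.lower p.1) term_lower) with
    | some p => some p.2
    | none => none

-- ===== PORT B =====
def fuzzyAltLoop (term_lower : String) (cand : Option (List (String × String))) : List (String × List (String × String)) → Option (List (String × String))
  | [] => cand
  | (k, v) :: rest =>
    let dl := PySem.Str.lower k
    if dl == term_lower then some v
    else if cand.isNone && (PySem.Str.isIn term_lower dl || PySem.Str.isIn dl term_lower) then
      fuzzyAltLoop term_lower (some v) rest
    else
      fuzzyAltLoop term_lower cand rest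

def fuzzy_match_term_py_alt (term : String) (terms_dict : List (String × List (String × String))) : Option (List (String × String)) :=
  fuzzyAltLoop (PySem.Str.lower term) none terms_dict

-- ===== PRECONDITION & SPEC =====
def Spec_fuzzy_match_term_py (term : String) (terms_dict : List (String × List (String × String))) (out : Option (List (String × String))) : Prop := out = fuzzy_match_term_py_alt term terms_dict
instance (term : String) (terms_dict : List (String × List (String × String))) (out : Option (List (String × String))) : Decidable (Spec_fuzzy_match_term_py term terms_dict out) := by unfold Spec_fuzzy_match_term_py; infer_instance

-- ===== CLAIM (what is proved, stated in full; the proofs are below) =====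
def Claim_equal_fuzzy_match_term_py : Prop := ∀ (term : String) (terms_dict : List (String × List (String × String))), Dom_fuzzy_match_term_py term terms_dict → Spec_fuzzy_match_term_py term terms_dict (fuzzy_match_term_py term terms_dict)

-- ===== LEMMAS AND PROOFS =====

-- Invariant of B's single pass: it equals "exact find?, else the pending candidate, else partial find?".
theorem fuzzyAltLoop_eq (term_lower : String) (cand : Option (List (String × String)))
    (td : List (String × List (String × String))) :
    fuzzyAltLoop term_lower cand td =
      match td.find? (fun p => PySem.Str.lower p.1 == term_lower) with
      | some p => some p.2
      | none =>
        match cand with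
        | some c => some c
        | none =>
          match td.find? (fun p => PySem.Str.isIn term_lower (PySem.Str.lower p.1) || PySem.Str.isIn (PySem.Str.lower p.1) term_lower) with
          | some p => some p.2
          | none => none := by
  induction td generalizing cand with
  | nil => cases cand <;> simp [fuzzyAltLoop]
  | cons hd rest ih =>
    obtain ⟨k, v⟩ := hd
    by_cases hex : (PySem.Str.lower k == term_lower) = true
    · simp [fuzzyAltLoop, List.find?, hex]
    · cases cand with
      | some c =>
        simp only [fuzzyAltLoop, Option.isNone_some, Bool.false_and, if_neg hex, ih]
        simp [List.find?, hex]
      | none =>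
        by_cases hp : (PySem.Str.isIn term_lower (PySem.Str.lower k) || PySem.Str.isIn (PySem.Str.lower k) term_lower) = true
        · simp only [fuzzyAltLoop, Option.isNone_none, Bool.true_and, if_neg hex, if_pos hp, ih]
          simp at hp
          rcases hp with hp | hp <;> simp [List.find?, hex, hp]
        · simp only [fuzzyAltLoop, Option.isNone_none, Bool.true_and, if_neg hex, if_neg hp, ih]
          simp at hp
          simp [List.find?, hex, hp.1, hp.2]

-- ===== VERDICT (by name: the statement is the Claim_ definition above) =====
theorem fuzzy_match_term_py_spec : Claim_equal_fuzzy_match_term_py := by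
  intro term terms_dict _
  unfold Spec_fuzzy_match_term_py fuzzy_match_term_py fuzzy_match_term_py_alt
  rw [fuzzyAltLoop_eq]
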